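-- pv_equiv track=rewrite | github.com/regulartim/aoc20 | 24/lobby_layout.py | getTilePosition
-- ===== SOURCE A (Python) =====
-- DIRECTIONS = {
-- 	"ne": (1,0,-1),
-- 	"e": (1,-1,0),
-- 	"se": (0,-1,1),
-- 	"sw": (-1,0,1),
-- 	"w": (-1,1,0),
-- 	"nw": (0,1,-1)
-- }
--
-- def addTuples(t1: tuple, t2: tuple) -> tuple:
-- 	res = list()
-- 	for a, b in zip(t1,t2):
-- 		res.append(a+b)
-- 	return tuple(res)
--
-- def getTilePosition(instructions: str, start=(0,0,0)) -> tuple: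
-- 	if not instructions:
-- 		return start
--
-- 	if instructions[0] in {"e","w"}:
-- 		di, instructions = instructions[0], instructions[1:]
-- 	else:
-- 		di, instructions = instructions[:2], instructions[2:]
--
-- 	new_pos = addTuples(start, DIRECTIONS[di])
-- 	return getTilePosition(instructions, new_pos)
-- ===== SOURCE B (Python) =====
-- DIRECTIONS = {
-- 	"ne": (1,0,-1),
-- 	"e": (1,-1,0),
-- 	"se": (0,-1,1),
-- 	"sw": (-1,0,1),
-- 	"w": (-1,1,0),
-- 	"nw": (0,1,-1)
-- }
--
-- def getTilePosition(instructions: str, start=(0,0,0)) -> tuple: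
--     x, y, z = start
--     i = 0
--     n = len(instructions)
--     while i < n:
--         c = instructions[i]
--         if c == "e":
--             x += 1; y -= 1; i += 1
--         elif c == "w":
--             x -= 1; y += 1; i += 1
--         else:
--             pair = instructions[i:i+2]
--             if pair == "ne":
--                 x += 1; z -= 1
--             elif pair == "nw":
--                 y += 1; z -= 1
--             elif pair == "se":
--                 y -= 1; z += 1
--             elif pair == "sw":
--                 x -= 1; z += 1
--             # unknown tokens are skipped (A raises KeyError there; outside Pre_)
--             i += 2
--     return (x, y, z)
-- ===== Notes on version B (the rewrite author's own statement) =====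
-- stated objective: simpler
-- what changed: Tail recursion with dict lookup and generic tuple addition is replaced by a flat index loop over the string with three scalar accumulators and a direct if/elif dispatch on the token characters (no dict, no tuple building, no string-suffix copies).
-- outside the precondition, e.g. on getTilePosition('x', (0, 0, 0)): A raises KeyError, B returns (0, 0, 0)
import Mathlib
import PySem

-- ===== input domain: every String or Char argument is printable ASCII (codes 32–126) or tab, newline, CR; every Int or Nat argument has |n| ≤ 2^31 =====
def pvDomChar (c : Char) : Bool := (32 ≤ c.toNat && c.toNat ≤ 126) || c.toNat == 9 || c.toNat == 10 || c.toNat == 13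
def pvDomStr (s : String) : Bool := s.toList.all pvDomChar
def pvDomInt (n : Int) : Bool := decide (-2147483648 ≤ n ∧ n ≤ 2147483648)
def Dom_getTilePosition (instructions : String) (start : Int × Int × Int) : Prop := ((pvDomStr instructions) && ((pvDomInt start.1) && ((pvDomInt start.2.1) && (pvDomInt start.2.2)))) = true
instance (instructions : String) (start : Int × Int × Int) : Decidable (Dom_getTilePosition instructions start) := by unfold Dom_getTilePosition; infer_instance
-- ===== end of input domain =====

-- ===== PORT A =====
-- One honest line: B replaces A's tail recursion (dict lookup + generic tuple addition +
-- string-suffix copies) by a flat loop over the characters with three scalar accumulators.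

-- DIRECTIONS dict, in source order
def DIRECTIONS : PySem.Dict String (Int × Int × Int) :=
  PySem.Dict.ofList [("ne", (1,0,-1)), ("e", (1,-1,0)), ("se", (0,-1,1)),
                     ("sw", (-1,0,1)), ("w", (-1,1,0)), ("nw", (0,1,-1))]

-- addTuples zips the two 3-tuples and adds componentwise (exact for 3-tuples)
def addTuples (t1 t2 : Int × Int × Int) : Int × Int × Int :=
  (t1.1 + t2.1, t1.2.1 + t2.2.1, t1.2.2 + t2.2.2)

-- A's recursion, over the character list of `instructions`:
-- instructions[0] / [:2] / [1:] / [2:] on cs = c :: rest are c, c :: rest.take 1,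
-- rest, rest.drop 1 (exact: all indices are small nonnegative literals).
-- DIRECTIONS[di] raises KeyError on an unknown token: there the port stops and
-- returns `start` (such inputs are excluded by Pre_getTilePosition).
def getTilePositionGo : List Char → (Int × Int × Int) → Int × Int × Int
  | [], start => start
  | c :: rest, start =>
    if c = 'e' ∨ c = 'w' then
      match DIRECTIONS.get? (String.mk [c]) with
      | some d => getTilePositionGo rest (addTuples start d)
      | none => start
    else
      match DIRECTIONS.get? (String.mk (c :: rest.take 1)) with
      | some d => getTilePositionGo (rest.drop 1) (addTuples start d)
      | none => start
  termination_by cs _ => cs.length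
  decreasing_by
    all_goals simp

def getTilePosition (instructions : String) (start : Int × Int × Int) : Int × Int × Int :=
  getTilePositionGo instructions.toList start

-- ===== PORT B =====
-- Source B's flat loop: index i walking the string = recursion on the not-yet-consumed
-- characters, with the three scalar accumulators x y z; unknown tokens are skipped.
def getTilePositionLoop : List Char → Int → Int → Int → Int × Int × Int
  | [], x, y, z => (x, y, z)
  | c :: rest, x, y, z =>
    if c = 'e' then getTilePositionLoop rest (x+1) (y-1) z
    else if c = 'w' then getTilePositionLoop rest (x-1) (y+1) z
    else
      match c :: rest.take 1 with
      | ['n', 'e'] => getTilePositionLoop (rest.drop 1) (x+1) y (z-1)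
      | ['n', 'w'] => getTilePositionLoop (rest.drop 1) x (y+1) (z-1)
      | ['s', 'e'] => getTilePositionLoop (rest.drop 1) x (y-1) (z+1)
      | ['s', 'w'] => getTilePositionLoop (rest.drop 1) (x-1) y (z+1)
      | _ => getTilePositionLoop (rest.drop 1) x y z
  termination_by cs _ _ _ => cs.length
  decreasing_by
    all_goals simp

def getTilePosition_alt (instructions : String) (start : Int × Int × Int) : Int × Int × Int :=
  getTilePositionLoop instructions.toList start.1 start.2.1 start.2.2

-- ===== PRECONDITION & SPEC =====
-- Pre_ excludes exactly the strings that are not a sequence of the six hex tokens: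
-- on those A raises KeyError (DIRECTIONS[di] on an unknown token).
def validTok : List Char → Bool
  | [] => true
  | 'e' :: rest => validTok rest
  | 'w' :: rest => validTok rest
  | 'n' :: 'e' :: rest => validTok rest
  | 'n' :: 'w' :: rest => validTok rest
  | 's' :: 'e' :: rest => validTok rest
  | 's' :: 'w' :: rest => validTok rest
  | _ => false

def Pre_getTilePosition (instructions : String) (start : Int × Int × Int) : Prop :=
  validTok instructions.toList = true
instance (instructions : String) (start : Int × Int × Int) : Decidable (Pre_getTilePosition instructions start) := by
  unfold Pre_getTilePosition; infer_instance

def pvWitness_getTilePosition : String × (Int × Int × Int) := ("esenee", (0, 0, 0))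

def Spec_getTilePosition (instructions : String) (start : Int × Int × Int) (out : Int × Int × Int) : Prop := out = getTilePosition_alt instructions start
instance (instructions : String) (start : Int × Int × Int) (out : Int × Int × Int) : Decidable (Spec_getTilePosition instructions start out) := by unfold Spec_getTilePosition; infer_instance

-- ===== CLAIM (what is proved, stated in full; the proofs are below) =====
def Claim_equal_getTilePosition : Prop := ∀ (instructions : String) (start : Int × Int × Int), Dom_getTilePosition instructions start → Pre_getTilePosition instructions start → Spec_getTilePosition instructions start (getTilePosition instructions start)

-- ===== LEMMAS AND PROOFS =====

theorem go_eq_loop : ∀ (cs : List Char) (s : Int × Int × Int), validTok cs = true →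
    getTilePositionGo cs s = getTilePositionLoop cs s.1 s.2.1 s.2.2 := by
  intro cs
  induction cs using validTok.induct with
  | case1 => intro s _; rw [getTilePositionGo.eq_def, getTilePositionLoop.eq_def]
  | case2 rest ih =>
    intro s h
    simp only [validTok] at h
    rw [getTilePositionGo.eq_def, getTilePositionLoop.eq_def]
    norm_num [show DIRECTIONS.get? (String.mk ['e']) = some ((1:Int),(-1:Int),(0:Int)) from by decide, addTuples]
    exact ih _ h
  | case3 rest ih =>
    intro s h
    simp only [validTok] at h
    rw [getTilePositionGo.eq_def, getTilePositionLoop.eq_def]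
    norm_num [show DIRECTIONS.get? (String.mk ['w']) = some ((-1:Int),(1:Int),(0:Int)) from by decide, addTuples]
    exact ih _ h
  | case4 rest ih =>
    intro s h
    simp only [validTok] at h
    rw [getTilePositionGo.eq_def, getTilePositionLoop.eq_def]
    norm_num [show DIRECTIONS.get? (String.mk ['n','e']) = some ((1:Int),(0:Int),(-1:Int)) from by decide, addTuples]
    exact ih _ h
  | case5 rest ih =>
    intro s h
    simp only [validTok] at h
    rw [getTilePositionGo.eq_def, getTilePositionLoop.eq_def]
    norm_num [show DIRECTIONS.get? (String.mk ['n','w']) = some ((0:Int),(1:Int),(-1:Int)) from by decide, addTuples]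
    exact ih _ h
  | case6 rest ih =>
    intro s h
    simp only [validTok] at h
    rw [getTilePositionGo.eq_def, getTilePositionLoop.eq_def]
    norm_num [show DIRECTIONS.get? (String.mk ['s','e']) = some ((0:Int),(-1:Int),(1:Int)) from by decide, addTuples]
    exact ih _ h
  | case7 rest ih =>
    intro s h
    simp only [validTok] at h
    rw [getTilePositionGo.eq_def, getTilePositionLoop.eq_def]
    norm_num [show DIRECTIONS.get? (String.mk ['s','w']) = some ((-1:Int),(0:Int),(1:Int)) from by decide, addTuples]
    exact ih _ h
  | case8 =>
    intro s h
    simp_all [validTok]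

-- ===== VERDICT (by name: the statement is the Claim_ definition above) =====
theorem getTilePosition_spec : Claim_equal_getTilePosition := by
  intro instructions start _ hpre
  unfold Spec_getTilePosition getTilePosition getTilePosition_alt
  exact go_eq_loop _ _ hpre
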